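-- pv_equiv track=rewrite | github.com/preetam1407/leadership_agpent | leadership_agent/ingest.py | _select_table_label_index
-- ===== SOURCE A (Python) =====
-- def _select_table_label_index(headers: list[str], period_columns: dict[int, str]) -> int:
--     candidates = [idx for idx in range(len(headers)) if idx not in period_columns]
--     if not candidates:
--         return 0
--     for idx in candidates:
--         lowered = headers[idx].lower()
--         if any(token in lowered for token in ["description", "metric", "label", "segment", "item"]):
--             return idx
--     for idx in candidates:
--         if headers[idx].strip():
--             return idx
--     return candidates[0]
-- ===== SOURCE B (Python) =====
-- def _select_table_label_index(headers, period_columns):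
--     keyword_idx = nonempty_idx = first_idx = None
--     for idx, header in enumerate(headers):
--         if idx in period_columns:
--             continue
--         if first_idx is None:
--             first_idx = idx
--         if keyword_idx is None and any(
--             token in header.lower()
--             for token in ("description", "metric", "label", "segment", "item")
--         ):
--             keyword_idx = idx
--         if nonempty_idx is None and header.strip():
--             nonempty_idx = idx
--     if keyword_idx is not None:
--         return keyword_idx
--     if nonempty_idx is not None:
--         return nonempty_idx
--     if first_idx is not None:
--         return first_idx
--     return 0
-- ===== Notes on version B (the rewrite author's own statement) =====
-- stated objective: alternative
-- what changed: A builds the candidate list and then scans it up to three times (keyword pass, non-empty pass, first element); B makes one pass over enumerate(headers), recording the first keyword-matching, first non-empty and first candidate index as it goes and resolving the priority order after the loop.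
import Mathlib
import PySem

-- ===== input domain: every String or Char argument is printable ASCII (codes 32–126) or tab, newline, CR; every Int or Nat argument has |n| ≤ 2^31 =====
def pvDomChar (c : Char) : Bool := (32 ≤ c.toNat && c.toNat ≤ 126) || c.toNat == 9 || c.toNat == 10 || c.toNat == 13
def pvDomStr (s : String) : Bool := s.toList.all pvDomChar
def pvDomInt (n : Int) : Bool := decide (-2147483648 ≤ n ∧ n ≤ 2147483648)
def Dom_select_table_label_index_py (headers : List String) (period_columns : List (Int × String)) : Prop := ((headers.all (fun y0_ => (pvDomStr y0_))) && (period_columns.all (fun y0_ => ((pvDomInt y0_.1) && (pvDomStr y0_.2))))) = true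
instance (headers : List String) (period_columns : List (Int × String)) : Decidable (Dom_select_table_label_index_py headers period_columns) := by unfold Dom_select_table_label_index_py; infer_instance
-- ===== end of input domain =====

-- B replaces A's three separate scans over the candidate list by a single pass over
-- enumerate(headers) recording the first keyword / first non-empty / first candidate index
-- and resolving the priority order afterwards (objective: alternative decomposition).

-- ===== PORT A =====
-- shared token test: any(token in lowered for token in [...])
def pvKw (lowered : String) : Bool :=
  (["description", "metric", "label", "segment", "item"] : List String).any
    (fun token => PySem.Str.isIn token lowered)

def select_table_label_index_py (headers : List String) (period_columns : List (Int × String)) : Int :=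
  let d := PySem.Dict.ofList period_columns
  let candidates := (PySem.List.pyRange 0 (headers.length : Int) 1).filter (fun idx => !(d.contains idx))
  if candidates = [] then 0
  else
    match candidates.find? (fun idx => pvKw (PySem.Str.lower (PySem.List.pyGetD headers idx ""))) with
    | some idx => idx
    | none =>
      match candidates.find? (fun idx => !(PySem.Str.strip (PySem.List.pyGetD headers idx "") == "")) with
      | some idx => idx
      | none => candidates.headD 0

-- ===== PORT B =====
def select_table_label_index_py_alt (headers : List String) (period_columns : List (Int × String)) : Int :=
  let d := PySem.Dict.ofList period_columns
  let st := (PySem.List.enumerate headers 0).foldl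
    (fun (st : Option Int × Option Int × Option Int) p =>
      if d.contains p.1 then st
      else
        ((if st.1.isNone && pvKw (PySem.Str.lower p.2) then some p.1 else st.1),
         (if st.2.1.isNone && !(PySem.Str.strip p.2 == "") then some p.1 else st.2.1),
         (if st.2.2.isNone then some p.1 else st.2.2)))
    (none, none, none)
  match st.1 with
  | some i => i
  | none =>
    match st.2.1 with
    | some i => i
    | none => st.2.2.getD 0

-- ===== PRECONDITION & SPEC =====
def Spec_select_table_label_index_py (headers : List String) (period_columns : List (Int × String)) (out : Int) : Prop := out = select_table_label_index_py_alt headers period_columns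
instance (headers : List String) (period_columns : List (Int × String)) (out : Int) : Decidable (Spec_select_table_label_index_py headers period_columns out) := by unfold Spec_select_table_label_index_py; infer_instance

-- ===== CLAIM (what is proved, stated in full; the proofs are below) =====
def Claim_equal_select_table_label_index_py : Prop := ∀ (headers : List String) (period_columns : List (Int × String)), Dom_select_table_label_index_py headers period_columns → Spec_select_table_label_index_py headers period_columns (select_table_label_index_py headers period_columns)

-- ===== LEMMAS AND PROOFS =====

-- one accumulator of B's fold, seen in isolation
def pvStep (d : PySem.Dict Int String) (q : String → Bool) (o : Option Int) (p : Int × String) : Option Int :=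
  if d.contains p.1 then o else if o.isNone && q p.2 then some p.1 else o

theorem pv_fold_triple (d : PySem.Dict Int String) (l : List (Int × String))
    (st : Option Int × Option Int × Option Int) :
    l.foldl
      (fun (st : Option Int × Option Int × Option Int) p =>
        if d.contains p.1 then st
        else
          ((if st.1.isNone && pvKw (PySem.Str.lower p.2) then some p.1 else st.1),
           (if st.2.1.isNone && !(PySem.Str.strip p.2 == "") then some p.1 else st.2.1),
           (if st.2.2.isNone then some p.1 else st.2.2))) st
    = (l.foldl (pvStep d (fun s => pvKw (PySem.Str.lower s))) st.1,
       l.foldl (pvStep d (fun s => !(PySem.Str.strip s == ""))) st.2.1,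
       l.foldl (pvStep d (fun _ => true)) st.2.2) := by
  induction l generalizing st with
  | nil => rfl
  | cons x l ih =>
    simp only [List.foldl_cons, ih]
    by_cases h : d.contains x.1 = true <;> simp [pvStep, h]

theorem pvStep_some (d : PySem.Dict Int String) (q : String → Bool) (l : List (Int × String)) (v : Int) :
    l.foldl (pvStep d q) (some v) = some v := by
  induction l with
  | nil => rfl
  | cons x l ih => by_cases h : d.contains x.1 = true <;> simp [pvStep, h, ih]

theorem pvStep_none (d : PySem.Dict Int String) (q : String → Bool) (l : List (Int × String)) :
    l.foldl (pvStep d q) none = (l.find? (fun p => !(d.contains p.1) && q p.2)).map (·.1) := by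
  induction l with
  | nil => rfl
  | cons x l ih =>
    by_cases h : d.contains x.1 = true <;> by_cases hq : q x.2 = true <;>
      simp [pvStep, h, hq, ih, pvStep_some]

theorem pv_find?_filter_and {α : Type} (l : List α) (p q : α → Bool) :
    (l.filter p).find? q = l.find? (fun x => p x && q x) := by
  induction l with
  | nil => rfl
  | cons x l ih =>
    by_cases hp : p x = true <;> by_cases hq : q x = true <;>
      simp [hp, hq, ih]

theorem pv_head?_filter {α : Type} (l : List α) (p : α → Bool) :
    (l.filter p).head? = l.find? p := by
  induction l with
  | nil => rfl
  | cons x l ih => by_cases hp : p x = true <;> simp [hp, ih]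

theorem pv_find?_congr {α : Type} (l : List α) (p q : α → Bool)
    (h : ∀ x ∈ l, p x = q x) : l.find? p = l.find? q := by
  induction l with
  | nil => rfl
  | cons x l ih =>
    have hx : p x = q x := h x (by simp)
    have ih' := ih (fun y hy => h y (by simp [hy]))
    by_cases hq : q x = true
    · rw [List.find?_cons_of_pos (hx ▸ hq), List.find?_cons_of_pos hq]
    · rw [List.find?_cons_of_neg (by simp_all), List.find?_cons_of_neg (by simp_all), ih']

theorem pv_getD_enum (pre hs : List String) (p : Int × String)
    (hp : p ∈ PySem.List.enumerate hs (pre.length : Int)) :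
    PySem.List.pyGetD (pre ++ hs) p.1 "" = p.2 := by
  induction hs generalizing pre with
  | nil => simp [PySem.List.enumerate] at hp
  | cons x hs ih =>
    rw [PySem.List.enumerate_cons] at hp
    rcases List.mem_cons.mp hp with h | h
    · subst h
      simp [PySem.List.pyGetD_natCast, List.getD]
    · have hlen : ((pre.length : Int)) + 1 = ((pre ++ [x]).length : Int) := by
        simp
      have := ih (pre ++ [x]) (by rw [← hlen]; exact h)
      simpa using this

theorem pv_cand_eq (d : PySem.Dict Int String) (headers : List String) :
    (PySem.List.pyRange 0 (headers.length : Int) 1).filter (fun idx => !(d.contains idx))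
    = ((PySem.List.enumerate headers 0).filter (fun p => !(d.contains p.1))).map (·.1) := by
  have h := PySem.List.map_fst_enumerate headers 0
  rw [zero_add] at h
  rw [← h, List.filter_map]
  rfl

theorem pv_find_eq (d : PySem.Dict Int String) (headers : List String) (q : String → Bool) :
    ((PySem.List.pyRange 0 (headers.length : Int) 1).filter (fun idx => !(d.contains idx))).find?
      (fun idx => q (PySem.List.pyGetD headers idx ""))
    = ((PySem.List.enumerate headers 0).find? (fun p => !(d.contains p.1) && q p.2)).map (·.1) := by
  rw [pv_cand_eq, List.find?_map]
  have h1 : ((PySem.List.enumerate headers 0).filter (fun p => !(d.contains p.1))).find?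
        ((fun idx => q (PySem.List.pyGetD headers idx "")) ∘ (·.1))
      = ((PySem.List.enumerate headers 0).filter (fun p => !(d.contains p.1))).find?
        (fun p => q p.2) := by
    apply pv_find?_congr
    intro x hx
    have hx' : x ∈ PySem.List.enumerate headers 0 := List.mem_of_mem_filter hx
    have hg := pv_getD_enum [] headers x (by simpa using hx')
    simp only [List.nil_append] at hg
    simp [Function.comp, hg]
  rw [h1, pv_find?_filter_and]

theorem pv_main (headers : List String) (period_columns : List (Int × String)) :
    select_table_label_index_py headers period_columns
    = select_table_label_index_py_alt headers period_columns := by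
  unfold select_table_label_index_py select_table_label_index_py_alt
  dsimp only
  rw [pv_fold_triple]
  dsimp only
  rw [pvStep_none, pvStep_none, pvStep_none,
      pv_find_eq (PySem.Dict.ofList period_columns) headers (fun s => pvKw (PySem.Str.lower s)),
      pv_find_eq (PySem.Dict.ofList period_columns) headers (fun s => !(PySem.Str.strip s == ""))]
  simp only [Bool.and_true]
  by_cases hE : ((PySem.List.enumerate headers 0).filter
      (fun p => !((PySem.Dict.ofList period_columns).contains p.1))) = []
  · have h3 : (PySem.List.enumerate headers 0).find?
        (fun p => !((PySem.Dict.ofList period_columns).contains p.1)) = none := by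
      rw [← pv_head?_filter, hE]; rfl
    rw [pv_cand_eq]
    simp [hE, ← pv_find?_filter_and, h3]
  · rw [pv_cand_eq, if_neg (by simp [hE])]
    have hh : (((PySem.List.enumerate headers 0).filter
        (fun p => !((PySem.Dict.ofList period_columns).contains p.1))).map (·.1)).headD 0
        = (((PySem.List.enumerate headers 0).find?
            (fun p => !((PySem.Dict.ofList period_columns).contains p.1))).map (·.1)).getD 0 := by
      rw [List.headD_eq_head?_getD, List.head?_map, pv_head?_filter]
    rw [hh]

-- ===== VERDICT (by name: the statement is the Claim_ definition above) =====
theorem select_table_label_index_py_spec : Claim_equal_select_table_label_index_py := by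
  intro headers period_columns _
  unfold Spec_select_table_label_index_py
  exact pv_main headers period_columns
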